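-- pv_equiv track=rewrite | github.com/kasperisme/hans | skills/order_nemlig.py | pick_product
-- ===== SOURCE A (Python) =====
-- def pick_product(products: list[dict]) -> dict | None:
--     """First product with id and available; else first with id."""
--     for p in products:
--         if p.get("id") is None:
--             continue
--         if p.get("available", True):
--             return p
--     for p in products:
--         if p.get("id") is not None:
--             return p
--     return None
-- ===== SOURCE B (Python) =====
-- def pick_product(products: list[dict]) -> dict | None:
--     """First product with id and available; else first with id."""
--     fallback = None
--     for p in products:
--         if p.get("id") is None:
--             continue
--         if p.get("available", True):
--             return p
--         if fallback is None:
--             fallback = p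
--     return fallback
-- ===== Notes on version B (the rewrite author's own statement) =====
-- stated objective: alternative
-- what changed: A's two sequential passes over products are fused into one loop that returns the first available id-bearing product immediately and keeps the first id-bearing product as a fallback accumulator.
import Mathlib
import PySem

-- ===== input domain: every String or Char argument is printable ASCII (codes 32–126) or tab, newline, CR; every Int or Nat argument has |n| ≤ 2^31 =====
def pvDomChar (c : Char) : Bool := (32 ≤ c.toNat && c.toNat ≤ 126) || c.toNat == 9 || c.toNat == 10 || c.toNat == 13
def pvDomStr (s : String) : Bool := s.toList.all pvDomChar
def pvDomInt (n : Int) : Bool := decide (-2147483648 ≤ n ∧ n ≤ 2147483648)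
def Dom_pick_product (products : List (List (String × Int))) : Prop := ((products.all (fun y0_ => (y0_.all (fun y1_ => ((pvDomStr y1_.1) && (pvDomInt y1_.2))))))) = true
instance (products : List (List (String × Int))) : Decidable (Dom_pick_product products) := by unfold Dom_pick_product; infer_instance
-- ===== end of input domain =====

-- B fuses A's two passes into one loop with a fallback accumulator (same return value).
-- ===== PORT A =====
-- p.get(k): first-match lookup in the association list
def pvGet (p : List (String × Int)) (k : String) : Option Int :=
  (p.find? (fun kv => kv.1 == k)).map (fun kv => kv.2)

-- p.get("available", True) as a truth value: absent → True, present → v ≠ 0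
def pvAvail (p : List (String × Int)) : Bool :=
  match pvGet p "available" with
  | none => true
  | some v => v != 0

-- first for-loop of A
def pickLoop1 (products : List (List (String × Int))) : Option (List (String × Int)) :=
  match products with
  | [] => none
  | p :: rest =>
    if (pvGet p "id").isNone then pickLoop1 rest
    else if pvAvail p then some p
    else pickLoop1 rest

-- second for-loop of A
def pickLoop2 (products : List (List (String × Int))) : Option (List (String × Int)) :=
  match products with
  | [] => none
  | p :: rest =>
    if (pvGet p "id").isSome then some p else pickLoop2 rest

def pick_product (products : List (List (String × Int))) : Option (List (String × Int)) :=
  match pickLoop1 products with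
  | some p => some p
  | none => pickLoop2 products

-- ===== PORT B =====
-- single pass with a 'fallback' accumulator (B's loop)
def pickFused (fallback : Option (List (String × Int))) (products : List (List (String × Int))) :
    Option (List (String × Int)) :=
  match products with
  | [] => fallback
  | p :: rest =>
    if (pvGet p "id").isNone then pickFused fallback rest
    else if pvAvail p then some p
    else pickFused (if fallback.isNone then some p else fallback) rest

def pick_product_alt (products : List (List (String × Int))) : Option (List (String × Int)) :=
  pickFused none products

-- ===== PRECONDITION & SPEC =====
def Spec_pick_product (products : List (List (String × Int))) (out : Option (List (String × Int))) : Prop := out = pick_product_alt products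
instance (products : List (List (String × Int))) (out : Option (List (String × Int))) : Decidable (Spec_pick_product products out) := by unfold Spec_pick_product; infer_instance

-- ===== CLAIM (what is proved, stated in full; the proofs are below) =====
def Claim_equal_pick_product : Prop := ∀ (products : List (List (String × Int))), Dom_pick_product products → Spec_pick_product products (pick_product products)

-- ===== LEMMAS AND PROOFS =====

-- ===== VERDICT (by name: the statement is the Claim_ definition above) =====
-- invariant of B's loop: it returns loop1's hit, else the fallback, else loop2's hit
theorem pickFused_eq (products : List (List (String × Int))) :
    ∀ fb, pickFused fb products =
      match pickLoop1 products with
      | some p => some p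
      | none => match fb with | some q => some q | none => pickLoop2 products := by
  induction products with
  | nil => intro fb; cases fb <;> rfl
  | cons p rest ih =>
    intro fb
    by_cases hid : (pvGet p "id").isNone
    · have hs : (pvGet p "id").isSome = false := by
        cases h : pvGet p "id" <;> simp_all
      simp [pickFused, pickLoop1, pickLoop2, hid, hs, ih]
    · by_cases ha : pvAvail p
      · simp [pickFused, pickLoop1, hid, ha]
      · have hs : (pvGet p "id").isSome = true := by
          cases h : pvGet p "id" <;> simp_all
        simp only [pickFused, pickLoop1, pickLoop2, hid, ha, hs, if_neg, if_pos,
          Bool.false_eq_true, if_false, ih]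
        cases h1 : pickLoop1 rest <;> cases fb <;> simp

theorem pick_product_spec : Claim_equal_pick_product := by
  intro products _
  unfold Spec_pick_product pick_product pick_product_alt
  rw [pickFused_eq]
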